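-- pv_equiv track=rewrite | github.com/vceniceros/algoritmos-y-programacion-1 | 10ejerciciosapelo.py | lista_max_frecuencia
-- ===== SOURCE A (Python) =====
-- def frecuencia(texto):
--      """
--      Escribir una función que dado un texto,
--      devuelva un diccionario con la frecuencia de cada palabra del texto.
--
--      >>> palabra = 'se viene boca se viene boca esto es boca aguante boca'
--      >>> frecuencia(palabra)
--      {'se': 2, 'viene': 2, 'boca': 4, 'esto': 1, 'es': 2, 'aguante': 1}
--      """
--      dicc = {}
--      palabras = texto.split()
--      for palabra in palabras:
--             dicc.update({palabra: texto.count(palabra)})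
--      return dicc
--
-- def lista_max_frecuencia(texto):
--      """
--      b. Escribir una función que reciba un diccionario como el generado por la función del ítem a
--        y devuelva una lista con la/s palabras que tienen la máxima frecuencia.
--     >>> palabra = 'se viene boca se viene boca esto es boca aguante boca'
--     >>> lista_max_frecuencia(palabra)
--     [('boca', 4)]
--      """
--      dicc = frecuencia(texto)
--      mayor = []
--      CONTEO = 1
--      PALABRA = 0
--      palabra_mas_contada = ''
--      max_count = 0
--      for palabra in dicc.items():
--           if palabra[CONTEO] > max_count:
--                max_count = palabra[CONTEO]
--      mayor = [x for x in dicc.items() if x[CONTEO] == max_count]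
--      return mayor
-- ===== SOURCE B (Python) =====
-- def frecuencia(texto):
--     dicc = {}
--     for palabra in texto.split():
--         dicc.update({palabra: texto.count(palabra)})
--     return dicc
--
--
-- def lista_max_frecuencia(texto):
--     max_count = 0
--     result = []
--     for palabra, conteo in frecuencia(texto).items():
--         if conteo > max_count:
--             max_count = conteo
--             result = [(palabra, conteo)]
--         elif conteo == max_count:
--             result.append((palabra, conteo))
--     return result
-- ===== Notes on version B (the rewrite author's own statement) =====
-- stated objective: alternative
-- what changed: B replaces A's two passes over the frequency dict (one to find the max, one to filter the winners) by a single pass that maintains the running max and resets/extends the winner list inline; frecuencia is kept unchanged.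
import Mathlib
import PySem

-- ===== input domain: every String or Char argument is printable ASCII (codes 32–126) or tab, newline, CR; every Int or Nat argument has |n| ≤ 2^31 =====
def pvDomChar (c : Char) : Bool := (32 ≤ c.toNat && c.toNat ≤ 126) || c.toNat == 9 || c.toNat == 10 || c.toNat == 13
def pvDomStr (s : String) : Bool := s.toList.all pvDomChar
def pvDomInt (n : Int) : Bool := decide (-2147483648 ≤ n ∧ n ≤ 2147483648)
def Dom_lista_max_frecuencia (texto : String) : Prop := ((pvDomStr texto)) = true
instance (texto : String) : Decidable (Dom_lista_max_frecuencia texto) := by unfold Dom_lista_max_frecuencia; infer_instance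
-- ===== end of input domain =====

-- B replaces A's two passes over the frequency dict (find the max, then filter the winners)
-- by a single pass maintaining the running max and the winner list inline (objective: alternative).

-- ===== PORT A =====
-- helper frecuencia (identical in Source A and Source B): dict of word -> texto.count(word) substring counts
def frecuencia (texto : String) : PySem.Dict String Int :=
  (PySem.Str.split₀ texto).foldl
    (fun d palabra => d.insert palabra ((PySem.Str.count texto palabra : Int))) PySem.Dict.empty

def lista_max_frecuencia (texto : String) : List (String × Int) :=
  let dicc := frecuencia texto
  let max_count : Int := dicc.items.foldl (fun m x => if x.2 > m then x.2 else m) 0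
  dicc.items.filter (fun x => x.2 == max_count)

-- ===== PORT B =====
def lista_max_frecuencia_alt (texto : String) : List (String × Int) :=
  ((frecuencia texto).items.foldl
    (fun (s : Int × List (String × Int)) x =>
      if x.2 > s.1 then (x.2, [x])
      else if x.2 == s.1 then (s.1, s.2 ++ [x])
      else s) ((0 : Int), ([] : List (String × Int)))).2

-- ===== PRECONDITION & SPEC =====
def Spec_lista_max_frecuencia (texto : String) (out : List (String × Int)) : Prop := out = lista_max_frecuencia_alt texto
instance (texto : String) (out : List (String × Int)) : Decidable (Spec_lista_max_frecuencia texto out) := by unfold Spec_lista_max_frecuencia; infer_instance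

-- ===== CLAIM (what is proved, stated in full; the proofs are below) =====
def Claim_equal_lista_max_frecuencia : Prop := ∀ (texto : String), Dom_lista_max_frecuencia texto → Spec_lista_max_frecuencia texto (lista_max_frecuencia texto)

-- ===== LEMMAS AND PROOFS =====

-- the running max only grows
theorem foldMax_le (l : List (String × Int)) (m : Int) :
    m ≤ l.foldl (fun m x => if x.2 > m then x.2 else m) m := by
  induction l generalizing m with
  | nil => simp
  | cons x t ih =>
    simp only [List.foldl_cons]
    split
    · exact le_trans (le_of_lt (by assumption)) (ih x.2)
    · exact ih m

-- invariant of B's single pass: it ends with the overall max M, and the winner list is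
-- the kept initial list (discarded iff the max grew) followed by the filter A computes.
theorem foldB_eq (l : List (String × Int)) (m : Int) (res : List (String × Int)) :
    l.foldl (fun (s : Int × List (String × Int)) x =>
      if x.2 > s.1 then (x.2, [x])
      else if x.2 == s.1 then (s.1, s.2 ++ [x])
      else s) (m, res)
    = (l.foldl (fun m x => if x.2 > m then x.2 else m) m,
       (if m < l.foldl (fun m x => if x.2 > m then x.2 else m) m then [] else res)
         ++ l.filter (fun x => x.2 == l.foldl (fun m x => if x.2 > m then x.2 else m) m)) := by
  induction l generalizing m res with
  | nil => simp
  | cons x t ih =>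
    simp only [List.foldl_cons, List.filter_cons]
    by_cases hgt : x.2 > m
    · simp only [if_pos hgt]
      rw [ih x.2 [x]]
      have hle := foldMax_le t x.2
      have hm : m < t.foldl (fun m x => if x.2 > m then x.2 else m) x.2 := lt_of_lt_of_le hgt hle
      rw [if_pos hm]
      rcases lt_or_eq_of_le hle with h | h
      · rw [if_pos h]
        have : ¬ (x.2 == t.foldl (fun m x => if x.2 > m then x.2 else m) x.2) = true := by
          simp only [beq_iff_eq]; omega
        rw [if_neg this]
      · rw [if_neg (by omega)]
        have : (x.2 == t.foldl (fun m x => if x.2 > m then x.2 else m) x.2) = true := by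
          simp only [beq_iff_eq]; omega
        rw [if_pos this]
        simp
    · simp only [if_neg hgt]
      have hle := foldMax_le t m
      by_cases heq : (x.2 == m) = true
      · simp only [if_pos heq]
        rw [ih m (res ++ [x])]
        rcases lt_or_eq_of_le hle with h | h
        · rw [if_pos h, if_pos h]
          have : ¬ (x.2 == t.foldl (fun m x => if x.2 > m then x.2 else m) m) = true := by
            simp only [beq_iff_eq] at heq ⊢; omega
          rw [if_neg this]
        · rw [if_neg (by omega), if_neg (by omega)]
          have : (x.2 == t.foldl (fun m x => if x.2 > m then x.2 else m) m) = true := by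
            simp only [beq_iff_eq] at heq ⊢; omega
          rw [if_pos this]
          simp
      · simp only [if_neg heq]
        rw [ih m res]
        have hx : x.2 ≠ m := by simpa using heq
        have : ¬ (x.2 == t.foldl (fun m x => if x.2 > m then x.2 else m) m) = true := by
          simp only [beq_iff_eq]; omega
        rw [if_neg this]

-- ===== VERDICT (by name: the statement is the Claim_ definition above) =====
theorem lista_max_frecuencia_spec : Claim_equal_lista_max_frecuencia := by
  intro texto _
  unfold Spec_lista_max_frecuencia lista_max_frecuencia lista_max_frecuencia_alt
  rw [foldB_eq]
  split <;> simp
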